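-- pv_equiv track=rewrite | github.com/alexandraback/datacollection | solutions_5686275109552128_1/Python/Nin0/pancakes.py | solve
-- ===== SOURCE A (Python) =====
-- def can_do(n, p):
--     # O(d * P), P = max_i p_i
--     for r in range(n):  # r is the number of special minutes.
--         m = n - r  # Maximal allowed content on a plate.
--         special_left = r
--         for i in range(len(p)):
--             if p[i] <= m:
--                 break
--             special_moves = (p[i] // m) - 1
--             if p[i] % m != 0:
--                 special_moves += 1
--             special_left -= special_moves
--             if special_left < 0:
--                 break
--         if special_left >= 0:
--             return True
--     return False
--
-- def solve(p):
--     # Using bisection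
--     # O(d * P * lg P), P = max_i p_i
--     p.sort(key=lambda x: -x)
--     a, b = 0, max(p)
--     while a < b:
--         c = (a + b) // 2
--         if can_do(c, p):
--             b = c
--         else:
--             a = c + 1
--     return a
-- ===== SOURCE B (Python) =====
-- def _sqrt_bound(n):
--     # smallest r >= 1 with r*r > n
--     r = 1
--     while r * r <= n:
--         r += 1
--     return r
--
-- def solve(p):
--     # Direct minimization over plate sizes m: total time = m + number of special
--     # (splitting) minutes = m + sum(ceil(x/m) - 1 over pancakes x >= 1).
--     # Only O(sqrt(max(p))) candidate values of m per pancake can be optimal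
--     # (the left endpoints of the blocks where every ceil(x/m) is constant),
--     # so only those are tried.  (Does not mutate p.)
--     mx = max(p)
--     if mx <= 0:
--         return 0
--     cand = list(range(1, _sqrt_bound(mx) + 1))
--     for x in p:
--         if x >= 1:
--             for k in range(1, _sqrt_bound(x) + 1):
--                 cand.append((x + k - 1) // k)
--     return min(m + sum((x + m - 1) // m - 1 for x in p if x > m)
--                for m in cand if m <= mx)
-- ===== Notes on version B (the rewrite author's own statement) =====
-- stated objective: alternative
-- what changed: Replaces sort + binary search over a feasibility checker (can_do) by a direct minimization of m + sum(ceil(p_i/m)-1) over the O(sqrt(max p)) candidate plate sizes m per pancake (block left-endpoints of the ceil functions); no sorting, no bisection, no mutation of p.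
import Mathlib
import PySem

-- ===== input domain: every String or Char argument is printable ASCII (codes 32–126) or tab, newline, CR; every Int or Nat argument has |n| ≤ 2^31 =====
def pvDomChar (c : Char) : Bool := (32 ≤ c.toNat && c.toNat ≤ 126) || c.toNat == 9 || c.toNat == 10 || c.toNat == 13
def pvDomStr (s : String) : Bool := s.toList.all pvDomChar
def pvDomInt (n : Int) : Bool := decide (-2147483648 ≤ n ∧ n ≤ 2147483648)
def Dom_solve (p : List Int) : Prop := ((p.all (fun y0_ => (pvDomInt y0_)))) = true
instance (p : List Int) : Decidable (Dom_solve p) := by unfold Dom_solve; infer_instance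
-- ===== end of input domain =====

-- B replaces A's sort + binary search over can_do by a direct minimization of
-- m + sum(ceil(x/m)-1) over the O(sqrt(max p)) candidate plate sizes m per pancake;
-- equivalence of RETURN values only (A sorts its argument in place, B does not mutate it).

-- ===== PORT A =====
-- special_moves for one pancake pile x at plate capacity m
def costA (x m : Int) : Int :=
  let sm := PySem.Int.floordiv x m - 1
  if PySem.Int.mod x m ≠ 0 then sm + 1 else sm

-- inner 'for i in range(len(p))' loop of can_do: returns the final special_left
def canDoInner (m : Int) : List Int → Int → Int
  | [], sl => sl
  | x :: rest, sl =>
    if x ≤ m then sl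
    else
      let sl' := sl - costA x m
      if sl' < 0 then sl' else canDoInner m rest sl'

-- outer 'for r in range(n)' loop of can_do ('return True' at the first success);
-- range(n) is lazy in Python, so it is ported as a counting loop r = 0, 1, …, n-1
-- (the Nat fuel n.toNat is exactly the number of remaining iterations)
def canDoLoop (n : Int) (p : List Int) : Nat → Int → Bool
  | 0, _ => false
  | f + 1, r => if 0 ≤ canDoInner (n - r) p r then true else canDoLoop n p f (r + 1)

def canDo (n : Int) (p : List Int) : Bool :=
  canDoLoop n p n.toNat 0

-- 'while a < b' bisection loop of solve; the Nat fuel (b - a decreases by ≥ 1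
-- each iteration, so (b - a).toNat steps always suffice) is only a totality guard
def bisectFuel (p : List Int) : Nat → Int → Int → Int
  | 0, a, _ => a
  | k + 1, a, b =>
    if a < b then
      let c := PySem.Int.floordiv (a + b) 2
      if canDo c p then bisectFuel p k a c else bisectFuel p k (c + 1) b
    else a

def bisect (p : List Int) (a b : Int) : Int := bisectFuel p (b - a).toNat a b

def solve (p : List Int) : Int :=
  let q := PySem.List.sorted p (fun x => -x)      -- p.sort(key=lambda x: -x), in place
  let b := (PySem.List.max? q (fun x => x)).getD 0  -- max(p); getD unreachable under Pre_
  bisect q 0 b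

-- ===== PORT B =====
-- _sqrt_bound: 'r = 1; while r*r <= n: r += 1; return r' (smallest r ≥ 1 with
-- r*r > n); the Nat fuel n.toNat + 2 is only a totality guard, always sufficient
def sqrtBoundGo (n : Int) : Nat → Int → Int
  | 0, r => r
  | f + 1, r => if r * r ≤ n then sqrtBoundGo n f (r + 1) else r

def sqrtBound (n : Int) : Int := sqrtBoundGo n (n.toNat + 2) 1

-- (x + m - 1) // m - 1
def costB (x m : Int) : Int := PySem.Int.floordiv (x + m - 1) m - 1

-- m + sum((x + m - 1) // m - 1 for x in p if x > m)
def cost (p : List Int) (m : Int) : Int :=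
  m + ((p.filter (fun x => decide (m < x))).map (fun x => costB x m)).sum

-- cand = list(range(1, _sqrt_bound(mx) + 1)); then for x in p: for k in
-- range(1, _sqrt_bound(x) + 1): cand.append((x + k - 1) // k)
def candList (p : List Int) (mx : Int) : List Int :=
  p.foldl
    (fun acc x =>
      if (1:Int) ≤ x then
        acc ++ (PySem.List.pyRange 1 (sqrtBound x + 1) 1).map
          (fun k => PySem.Int.floordiv (x + k - 1) k)
      else acc)
    (PySem.List.pyRange 1 (sqrtBound mx + 1) 1)

def solve_alt (p : List Int) : Int :=
  let mx := (PySem.List.max? p (fun x => x)).getD 0  -- max(p); getD unreachable under Pre_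
  if mx ≤ 0 then 0
  else
    (PySem.List.min?
      (((candList p mx).filter (fun m => decide (m ≤ mx))).map (cost p))
      (fun x => x)).getD 0

-- ===== PRECONDITION & SPEC =====
-- Pre_ excludes only the empty list, on which A's max(p) raises ValueError (B's does too).
def Pre_solve (p : List Int) : Prop := p ≠ []
instance (p : List Int) : Decidable (Pre_solve p) := by unfold Pre_solve; infer_instance
def pvWitness_solve : List Int := [3, 1]

def Spec_solve (p : List Int) (out : Int) : Prop := out = solve_alt p
instance (p : List Int) (out : Int) : Decidable (Spec_solve p out) := by unfold Spec_solve; infer_instance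

-- ===== CLAIM (what is proved, stated in full; the proofs are below) =====
def Claim_equal_solve : Prop := ∀ (p : List Int), Dom_solve p → Pre_solve p → Spec_solve p (solve p)

-- ===== LEMMAS AND PROOFS =====

-- ceiling division ⌈x/b⌉ as B computes it (proof-side name for the shared expression)
def cdiv (x b : Int) : Int := PySem.Int.floordiv (x + b - 1) b

-- the special-minute total S m l (shared spec of both ports' per-m work)
def S (m : Int) (l : List Int) : Int :=
  ((l.filter (fun x => decide (m < x))).map (fun x => costB x m)).sum

-- the same total, summed over the positive piles instead (piles in (0, m] contribute 0)
def T (m : Int) (l : List Int) : Int :=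
  ((l.filter (fun x => decide ((1:Int) ≤ x))).map (fun x => cdiv x m - 1)).sum

lemma cdiv_le_iff {x b q : Int} (hb : 1 ≤ b) : cdiv x b ≤ q ↔ x ≤ q * b := by
  unfold cdiv
  have h := PySem.Int.floordiv_lt_iff_lt_mul (a := x + b - 1) (b := b) (q := q + 1) (by omega)
  have e : (q + 1) * b = q * b + b := by ring
  rw [e] at h
  constructor
  · intro h1
    have h2 := h.mp (by rw [Int.lt_add_one_iff]; exact h1)
    linarith
  · intro h1
    have h2 := h.mpr (by linarith)
    rw [Int.lt_add_one_iff] at h2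
    exact h2

lemma le_cdiv_iff {x b q : Int} (hb : 1 ≤ b) : q ≤ cdiv x b ↔ (q - 1) * b < x := by
  unfold cdiv
  have h := PySem.Int.le_floordiv_iff_mul_le (a := x + b - 1) (b := b) (q := q) (by omega)
  have e : (q - 1) * b = q * b - b := by ring
  rw [h, e]
  constructor <;> intro h1 <;> linarith

lemma one_le_cdiv {x b : Int} (hb : 1 ≤ b) (hx : 1 ≤ x) : 1 ≤ cdiv x b := by
  rw [le_cdiv_iff hb]
  have e : ((1:Int) - 1) * b = 0 := by ring
  rw [e]; omega

lemma cdiv_antitone {x b₁ b₂ : Int} (hx : 1 ≤ x) (h1 : 1 ≤ b₁) (h12 : b₁ ≤ b₂) :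
    cdiv x b₂ ≤ cdiv x b₁ := by
  rw [cdiv_le_iff (by omega)]
  have hxb : x ≤ cdiv x b₁ * b₁ := (cdiv_le_iff h1).mp le_rfl
  have hc1 : 1 ≤ cdiv x b₁ := one_le_cdiv h1 hx
  nlinarith

lemma costB_nonneg {x m : Int} (hm : 1 ≤ m) (hx : m < x) : 0 ≤ costB x m := by
  have h : 1 ≤ cdiv x m := one_le_cdiv hm (by omega)
  unfold costB; unfold cdiv at h; omega

lemma costA_eq_costB {x m : Int} (hm : 1 ≤ m) (hx : m < x) : costA x m = costB x m := by
  have hm0 : (0:Int) < m := by omega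
  have hd := PySem.Int.floordiv_mul_add_mod x m
  have hr0 := PySem.Int.mod_nonneg x hm0
  have hr1 := PySem.Int.mod_lt x hm0
  unfold costA costB
  by_cases hz : PySem.Int.mod x m = 0
  · have : PySem.Int.floordiv (x + m - 1) m = PySem.Int.floordiv x m := by
      rw [PySem.Int.floordiv_eq_iff_of_pos hm0]
      have e1 : (PySem.Int.floordiv x m + 1) * m = PySem.Int.floordiv x m * m + m := by ring
      constructor <;> linarith
    simp [hz, this]
  · have : PySem.Int.floordiv (x + m - 1) m = PySem.Int.floordiv x m + 1 := by
      rw [PySem.Int.floordiv_eq_iff_of_pos hm0]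
      have e1 : (PySem.Int.floordiv x m + 1) * m = PySem.Int.floordiv x m * m + m := by ring
      have e2 : (PySem.Int.floordiv x m + 1 + 1) * m = PySem.Int.floordiv x m * m + m + m := by ring
      have hr2 : 1 ≤ PySem.Int.mod x m := by omega
      constructor <;> linarith
    simp [hz, this]

lemma S_nonneg {m : Int} (hm : 1 ≤ m) (l : List Int) : 0 ≤ S m l := by
  unfold S
  apply List.sum_nonneg
  intro y hy
  obtain ⟨x, hx, rfl⟩ := List.mem_map.mp hy
  have := List.mem_filter.mp hx
  exact costB_nonneg hm (by simpa using this.2)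

lemma S_eq_zero {m : Int} {l : List Int} (h : ∀ x ∈ l, x ≤ m) : S m l = 0 := by
  unfold S
  have : l.filter (fun x => decide (m < x)) = [] := by
    rw [List.filter_eq_nil_iff]
    intro x hx
    simpa using not_lt.mpr (h x hx)
  simp [this]

lemma S_perm {m : Int} {l l' : List Int} (h : l.Perm l') : S m l = S m l' := by
  unfold S
  exact ((h.filter _).map _).sum_eq

lemma S_eq_T {m : Int} (hm : 1 ≤ m) (l : List Int) : S m l = T m l := by
  induction l with
  | nil => simp [S, T]
  | cons x t ih =>
    by_cases h1 : m < x
    · have h2 : (1:Int) ≤ x := by omega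
      simp only [S, T, List.filter_cons] at ih ⊢
      simp only [decide_eq_true_eq] at *
      rw [if_pos h1, if_pos h2]
      simp only [List.map_cons, List.sum_cons]
      have : costB x m = cdiv x m - 1 := rfl
      omega
    · by_cases h2 : (1:Int) ≤ x
      · have hz : cdiv x m - 1 = 0 := by
          have ha : cdiv x m ≤ 1 := by
            rw [cdiv_le_iff hm]; omega
          have hb := one_le_cdiv hm h2
          omega
        simp only [S, T, List.filter_cons] at ih ⊢
        simp only [decide_eq_true_eq] at *
        rw [if_neg h1, if_pos h2]
        simp only [List.map_cons, List.sum_cons]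
        omega
      · simp only [S, T, List.filter_cons] at ih ⊢
        simp only [decide_eq_true_eq] at *
        rw [if_neg h1, if_neg h2]
        exact ih

lemma inner_iff {m : Int} (hm : 1 ≤ m) :
    ∀ {l : List Int} (r : Int), l.Pairwise (fun a b => b ≤ a) →
      (0 ≤ canDoInner m l r ↔ S m l ≤ r) := by
  intro l
  induction l with
  | nil => intro r _; simp [canDoInner, S]
  | cons x rest ih =>
    intro r hp
    have hx : ∀ y ∈ rest, y ≤ x := fun y hy => (List.pairwise_cons.mp hp).1 y hy
    have hrest := (List.pairwise_cons.mp hp).2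
    by_cases hxm : x ≤ m
    · have hz : S m (x :: rest) = 0 := S_eq_zero (by
        intro y hy
        rcases List.mem_cons.mp hy with rfl | hy'
        · exact hxm
        · exact le_trans (hx y hy') hxm)
      simp [canDoInner, hxm, hz]
    · rw [not_le] at hxm
      have hS : S m (x :: rest) = costB x m + S m rest := by
        simp [S, hxm]
      have hAB := costA_eq_costB hm hxm
      by_cases hneg : r - costA x m < 0
      · have h1 : ¬ (0 ≤ canDoInner m (x :: rest) r) := by
          simp [canDoInner, not_le.mpr hxm, hneg]; omega
        have h2 : ¬ (S m (x :: rest) ≤ r) := by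
          have := S_nonneg hm rest
          omega
        simp [h1, h2]
      · have : canDoInner m (x :: rest) r = canDoInner m rest (r - costA x m) := by
          simp [canDoInner, not_le.mpr hxm, hneg]
        rw [this, ih (r - costA x m) hrest, hS]
        omega

lemma canDoLoop_iff (n : Int) (p : List Int) :
    ∀ (f : Nat) (r : Int), canDoLoop n p f r = true ↔
      ∃ r' : Int, r ≤ r' ∧ r' < r + f ∧ 0 ≤ canDoInner (n - r') p r' := by
  intro f
  induction f with
  | zero =>
    intro r
    simp only [canDoLoop]
    constructor
    · intro h; exact absurd h (by simp)
    · rintro ⟨r', h1, h2, _⟩; omega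
  | succ f ih =>
    intro r
    by_cases h : 0 ≤ canDoInner (n - r) p r
    · simp only [canDoLoop, if_pos h]
      constructor
      · intro _; exact ⟨r, le_refl r, by omega, h⟩
      · intro _; trivial
    · simp only [canDoLoop, if_neg h, ih (r + 1)]
      constructor
      · rintro ⟨r', h1, h2, h3⟩; exact ⟨r', by omega, by omega, h3⟩
      · rintro ⟨r', h1, h2, h3⟩
        refine ⟨r', ?_, by omega, h3⟩
        rcases eq_or_lt_of_le h1 with rfl | h4
        · exact absurd h3 h
        · omega

lemma canDo_iff {q : List Int} (hq : q.Pairwise (fun a b => b ≤ a)) (n : Int) :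
    canDo n q = true ↔ ∃ m, 1 ≤ m ∧ m + S m q ≤ n := by
  unfold canDo
  rw [canDoLoop_iff]
  constructor
  · rintro ⟨r, hr0, hrn, h⟩
    have hrn' : r < n := by omega
    refine ⟨n - r, by omega, ?_⟩
    have := (inner_iff (by omega) r hq).mp h
    omega
  · rintro ⟨m, hm, hle⟩
    have hSn := S_nonneg hm q
    refine ⟨n - m, by omega, by omega, ?_⟩
    have hmm : n - (n - m) = m := by omega
    rw [hmm]
    exact (inner_iff hm (n - m) hq).mpr (by omega)

lemma bisect_eq {q : List Int} {L : Int} (hc : ∀ n, canDo n q = true ↔ L ≤ n) :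
    ∀ (k : Nat) (a b : Int), (b - a).toNat ≤ k → a ≤ L → L ≤ b → bisectFuel q k a b = L := by
  intro k
  induction k with
  | zero =>
    intro a b hk ha hb
    simp only [bisectFuel]
    omega
  | succ k ih =>
    intro a b hk ha hb
    rw [bisectFuel]
    by_cases hab : a < b
    · simp only [if_pos hab]
      have hmid := PySem.Int.le_floordiv_iff_mul_le (a := a + b) (b := 2) (q := a) (by norm_num)
      have hmid2 := PySem.Int.floordiv_lt_iff_lt_mul (a := a + b) (b := 2) (q := b) (by norm_num)
      set c := PySem.Int.floordiv (a + b) 2 with hcdef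
      have hac : a ≤ c := by omega
      have hcb : c < b := by omega
      by_cases hL : L ≤ c
      · rw [if_pos ((hc c).mpr hL)]
        exact ih a c (by omega) ha hL
      · have hfalse : canDo c q = false := by
          cases h : canDo c q with
          | false => rfl
          | true => exact absurd ((hc c).mp h) hL
        rw [hfalse]
        simp only [Bool.false_eq_true, if_false]
        exact ih (c + 1) b (by omega) (by omega) hb
    · simp [hab]; omega

-- ------- sqrt_bound: characterization and monotonicity -------

lemma sqrtBoundGo_spec (n : Int) :
    ∀ (f : Nat) (r : Int), 1 ≤ r → (∀ s, 1 ≤ s → s < r → s * s ≤ n) →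
      n < (r + f) * (r + f) →
      1 ≤ sqrtBoundGo n f r ∧ n < sqrtBoundGo n f r * sqrtBoundGo n f r ∧
        ∀ s, 1 ≤ s → s < sqrtBoundGo n f r → s * s ≤ n := by
  intro f
  induction f with
  | zero =>
    intro r h1 h2 h3
    simp only [sqrtBoundGo]
    refine ⟨h1, ?_, h2⟩
    simpa using h3
  | succ f ih =>
    intro r h1 h2 h3
    rw [sqrtBoundGo]
    by_cases h : r * r ≤ n
    · rw [if_pos h]
      refine ih (r + 1) (by omega) ?_ ?_
      · intro s hs1 hs2
        rcases eq_or_lt_of_le (by omega : s ≤ r) with rfl | h4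
        · exact h
        · exact h2 s hs1 h4
      · have e : r + 1 + (f : Int) = r + ((f : Int) + 1) := by ring
        rw [e]
        simpa [Nat.cast_add] using h3
    · rw [if_neg h]
      exact ⟨h1, by omega, h2⟩

lemma sqrtBound_spec (n : Int) :
    1 ≤ sqrtBound n ∧ n < sqrtBound n * sqrtBound n ∧
      ∀ s, 1 ≤ s → s < sqrtBound n → s * s ≤ n := by
  unfold sqrtBound
  refine sqrtBoundGo_spec n (n.toNat + 2) 1 le_rfl (by intro s h1 h2; omega) ?_
  have h0 : n < 1 + ((n.toNat : Int) + 2) := by omega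
  have h1 : (1:Int) ≤ 1 + ((n.toNat : Int) + 2) := by omega
  push_cast
  nlinarith

lemma sqrtBound_mono {x y : Int} (h : x ≤ y) : sqrtBound x ≤ sqrtBound y := by
  by_contra hcon
  rw [not_le] at hcon
  obtain ⟨hy1, hy2, _⟩ := sqrtBound_spec y
  obtain ⟨_, _, hx3⟩ := sqrtBound_spec x
  have := hx3 (sqrtBound y) hy1 hcon
  omega

-- ------- the candidate list -------

lemma candList_eq (p : List Int) (mx : Int) :
    candList p mx = PySem.List.pyRange 1 (sqrtBound mx + 1) 1 ++
      (p.filter (fun x => decide ((1:Int) ≤ x))).flatMap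
        (fun x => (PySem.List.pyRange 1 (sqrtBound x + 1) 1).map
          (fun k => PySem.Int.floordiv (x + k - 1) k)) := by
  unfold candList
  rw [PySem.List.foldl_ite_eq_foldl_filter]
  rw [PySem.List.foldl_append_eq_flatMap]

lemma mem_cand_range {p : List Int} {mx c : Int} (h1 : 1 ≤ c) (h2 : c ≤ sqrtBound mx) :
    c ∈ candList p mx := by
  rw [candList_eq]
  exact List.mem_append_left _ (PySem.List.mem_pyRange_one.mpr (by omega))

lemma mem_cand_x {p : List Int} {mx x k : Int} (hx : x ∈ p) (hx1 : 1 ≤ x)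
    (hk1 : 1 ≤ k) (hk2 : k ≤ sqrtBound x) : cdiv x k ∈ candList p mx := by
  rw [candList_eq]
  refine List.mem_append_right _ (List.mem_flatMap.mpr ⟨x, ?_, ?_⟩)
  · exact List.mem_filter.mpr ⟨hx, by simpa using hx1⟩
  · exact List.mem_map.mpr ⟨k, PySem.List.mem_pyRange_one.mpr (by omega), rfl⟩

lemma cand_ge_one {p : List Int} {mx c : Int} (hc : c ∈ candList p mx) : 1 ≤ c := by
  rw [candList_eq] at hc
  rcases List.mem_append.mp hc with h | h
  · exact (PySem.List.mem_pyRange_one.mp h).1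
  · obtain ⟨x, hx, hmem⟩ := List.mem_flatMap.mp h
    obtain ⟨k, hk, rfl⟩ := List.mem_map.mp hmem
    have hx1 : (1:Int) ≤ x := by simpa using (List.mem_filter.mp hx).2
    have hk1 := (PySem.List.mem_pyRange_one.mp hk).1
    exact one_le_cdiv hk1 hx1

lemma foldl_max_attain (g : Int → Int) :
    ∀ (l : List Int) (a : Int), l.foldl (fun acc x => max acc (g x)) a = a ∨
      ∃ x ∈ l, l.foldl (fun acc x => max acc (g x)) a = g x := by
  intro l
  induction l with
  | nil => intro a; left; rfl
  | cons x t ih =>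
    intro a
    simp only [List.foldl_cons]
    rcases ih (max a (g x)) with h | ⟨y, hy, h⟩
    · rcases max_choice a (g x) with h2 | h2
      · left; rw [h, h2]
      · right; exact ⟨x, List.mem_cons_self, by rw [h, h2]⟩
    · right; exact ⟨y, List.mem_cons_of_mem _ hy, h⟩

-- the block-endpoint reduction: for any m in [1, mx] some candidate m' ≤ m costs no more
lemma cand_reduce {p : List Int} {mx m : Int} (hmx : ∀ y ∈ p, y ≤ mx)
    (hm1 : 1 ≤ m) (hmmx : m ≤ mx) :
    ∃ m', m' ∈ candList p mx ∧ 1 ≤ m' ∧ m' ≤ m ∧ cost p m' ≤ cost p m := by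
  set lv : Int → Int := fun x => cdiv x (cdiv x m) with hlv
  set g : Int → Int := fun x => if 1 ≤ x then lv x else 1 with hg
  set m' : Int := p.foldl (fun acc x => max acc (g x)) 1 with hm'
  have hfold := PySem.List.le_foldl_max_int p g 1
  have hm'1 : 1 ≤ m' := hfold.1
  -- per positive pile: 1 ≤ cdiv x m, x ≤ m * cdiv x m, lv x ≤ m, 1 ≤ lv x, cdiv x (lv x) = cdiv x m
  have hkey : ∀ x, 1 ≤ x → lv x ≤ m ∧ 1 ≤ lv x ∧ cdiv x (lv x) = cdiv x m := by
    intro x hx1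
    have hk1 : 1 ≤ cdiv x m := one_le_cdiv hm1 hx1
    have hxk : x ≤ cdiv x m * m := (cdiv_le_iff hm1).mp le_rfl
    have hlm : lv x ≤ m := by
      rw [hlv]
      simp only []
      rw [cdiv_le_iff hk1]
      linarith [mul_comm (cdiv x m) m]
    have hl1 : 1 ≤ lv x := one_le_cdiv hk1 hx1
    refine ⟨hlm, hl1, ?_⟩
    have hxl : x ≤ lv x * cdiv x m := (cdiv_le_iff hk1).mp le_rfl
    have hup : cdiv x (lv x) ≤ cdiv x m := by
      rw [cdiv_le_iff hl1]
      linarith [mul_comm (cdiv x m) (lv x)]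
    have hdown : cdiv x m ≤ cdiv x (lv x) := by
      rw [le_cdiv_iff hl1]
      have hstrict : (cdiv x m - 1) * m < x := (le_cdiv_iff hm1).mp le_rfl
      have hnn : 0 ≤ cdiv x m - 1 := by omega
      have := mul_le_mul_of_nonneg_left hlm hnn
      linarith
    omega
  have hle_m' : ∀ x ∈ p, g x ≤ m' := hfold.2
  have hm'le : m' ≤ m := by
    rcases foldl_max_attain g p 1 with h | ⟨x0, hx0, h⟩
    · rw [← hm'] at h; omega
    · rw [← hm'] at h
      rw [h, hg]
      by_cases hx01 : (1:Int) ≤ x0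
      · simpa [hx01] using (hkey x0 hx01).1
      · simp [hx01]; omega
  have hmem : m' ∈ candList p mx := by
    have hsmx := sqrtBound_spec mx
    rcases foldl_max_attain g p 1 with h | ⟨x0, hx0, h⟩
    · rw [← hm'] at h; rw [h]
      exact mem_cand_range le_rfl hsmx.1
    · rw [← hm'] at h
      by_cases hx01 : (1:Int) ≤ x0
      · have hgx0 : g x0 = lv x0 := by simp [hg, hx01]
        rw [h, hgx0]
        have hsx := sqrtBound_spec x0
        have hk1 : 1 ≤ cdiv x0 m := one_le_cdiv hm1 hx01
        by_cases hkle : cdiv x0 m ≤ sqrtBound x0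
        · exact mem_cand_x hx0 hx01 hk1 hkle
        · rw [not_le] at hkle
          have hlsmall : lv x0 ≤ sqrtBound x0 := by
            have h1 : lv x0 ≤ cdiv x0 (sqrtBound x0 + 1) := by
              rw [hlv]
              exact cdiv_antitone hx01 (by omega) (by omega)
            have h2 : cdiv x0 (sqrtBound x0 + 1) ≤ sqrtBound x0 := by
              rw [cdiv_le_iff (by omega)]
              nlinarith [hsx.2.1, hsx.1]
            omega
          have hl1 : 1 ≤ lv x0 := (hkey x0 hx01).2.1
          exact mem_cand_range hl1 (le_trans hlsmall (sqrtBound_mono (hmx x0 hx0)))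
      · rw [h, hg]
        simp only [hx01, if_false]
        exact mem_cand_range le_rfl hsmx.1
  refine ⟨m', hmem, hm'1, hm'le, ?_⟩
  -- cost p m' ≤ cost p m, termwise over the positive piles
  have hT : T m' p ≤ T m p := by
    unfold T
    apply List.sum_le_sum
    intro x hxmem
    have hx1 : (1:Int) ≤ x := by simpa using (List.mem_filter.mp hxmem).2
    have hxp : x ∈ p := (List.mem_filter.mp hxmem).1
    have hlvle : lv x ≤ m' := by
      have := hle_m' x hxp
      rw [hg] at this
      simpa [hx1] using this
    have h1 : cdiv x m' ≤ cdiv x (lv x) :=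
      cdiv_antitone hx1 (hkey x hx1).2.1 hlvle
    have h2 : cdiv x (lv x) = cdiv x m := (hkey x hx1).2.2
    omega
  have e1 : cost p m' = m' + S m' p := rfl
  have e2 : cost p m = m + S m p := rfl
  rw [e1, e2, S_eq_T hm'1, S_eq_T hm1]
  omega

-- ===== VERDICT (by name: the statement is the Claim_ definition above) =====
theorem solve_spec : Claim_equal_solve := by
  intro p _ hpre
  unfold Spec_solve solve solve_alt
  set q := PySem.List.sorted p (fun x => -x) with hqdef
  have hperm : q.Perm p := PySem.List.sorted_perm p (fun x => -x) false
  have hpair : q.Pairwise (fun a b => b ≤ a) := by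
    have := PySem.List.sorted_pairwise p (fun x => -x)
    exact this.imp (by intro a b h; omega)
  -- max(p) = max(q) as a value
  obtain ⟨mx, hmx⟩ : ∃ mx, PySem.List.max? p (fun x => x) = some mx := by
    cases h : PySem.List.max? p (fun x => x) with
    | none => exact absurd ((PySem.List.max?_eq_none_iff _ _).mp h) hpre
    | some m => exact ⟨m, rfl⟩
  obtain ⟨mq, hmq⟩ : ∃ mq, PySem.List.max? q (fun x => x) = some mq := by
    cases h : PySem.List.max? q (fun x => x) with
    | none =>
      have hq0 := (PySem.List.max?_eq_none_iff _ _).mp h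
      exact absurd ((hq0 ▸ hperm).symm.eq_nil) hpre
    | some m => exact ⟨m, rfl⟩
  have hmxmem : mx ∈ p := PySem.List.max?_mem hmx
  have hmxmax : ∀ y ∈ p, y ≤ mx := PySem.List.max?_isMax hmx
  have hmqeq : mq = mx := by
    have h1 : mq ≤ mx := hmxmax mq (hperm.mem_iff.mp (PySem.List.max?_mem hmq))
    have h2 : mx ≤ mq := PySem.List.max?_isMax hmq mx (hperm.mem_iff.mpr hmxmem)
    omega
  simp only [hmx, hmq, hmqeq, Option.getD_some]
  by_cases hneg : mx ≤ 0
  · rw [if_pos hneg]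
    unfold bisect
    have h0 : (mx - 0).toNat = 0 := by omega
    rw [h0]
    rfl
  · rw [if_neg hneg]
    have hmx1 : 1 ≤ mx := by omega
    -- the candidate list is nonempty below mx: m = 1 is always in it
    have h1cand : (1:Int) ∈ candList p mx := mem_cand_range le_rfl (sqrtBound_spec mx).1
    have hmem1 : cost p 1 ∈ ((candList p mx).filter (fun m => decide (m ≤ mx))).map (cost p) :=
      List.mem_map_of_mem (List.mem_filter.mpr ⟨h1cand, by simpa using hmx1⟩)
    obtain ⟨M, hM⟩ : ∃ M, PySem.List.min?
        (((candList p mx).filter (fun m => decide (m ≤ mx))).map (cost p)) (fun x => x) = some M := by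
      cases h : PySem.List.min? (((candList p mx).filter (fun m => decide (m ≤ mx))).map (cost p)) (fun x => x) with
      | none =>
        rw [PySem.List.min?_eq_none_iff] at h
        rw [h] at hmem1
        exact absurd hmem1 (List.not_mem_nil)
      | some m => exact ⟨m, rfl⟩
    rw [hM]
    simp only [Option.getD_some]
    obtain ⟨m0, hm0mem, hm0eq⟩ := List.mem_map.mp (PySem.List.min?_mem hM)
    have hm0cand : m0 ∈ candList p mx := (List.mem_filter.mp hm0mem).1
    have hm01 : 1 ≤ m0 := cand_ge_one hm0cand
    have hm0mx : m0 ≤ mx := by simpa using (List.mem_filter.mp hm0mem).2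
    have hMmin : ∀ y ∈ ((candList p mx).filter (fun m => decide (m ≤ mx))).map (cost p), M ≤ y :=
      PySem.List.min?_isMin hM
    have hSmx : S mx p = 0 := S_eq_zero hmxmax
    have hcostmx : cost p mx = mx := by
      have : ((p.filter (fun x => decide (mx < x))).map (fun x => costB x mx)).sum = S mx p := rfl
      unfold cost; rw [this, hSmx]; ring
    -- M ≤ cost of any candidate reduction of mx, hence ≤ mx
    obtain ⟨mr, hmrmem, hmr1, hmrle, hmrcost⟩ := cand_reduce hmxmax hmx1 le_rfl
    have hmrfilt : cost p mr ∈ ((candList p mx).filter (fun m => decide (m ≤ mx))).map (cost p) :=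
      List.mem_map_of_mem (List.mem_filter.mpr ⟨hmrmem, by simp; omega⟩)
    have hMle : M ≤ mx := by
      have := hMmin _ hmrfilt
      omega
    have hMpos : 1 ≤ M := by
      have hS0 := S_nonneg hm01 p
      have : cost p m0 = m0 + S m0 p := rfl
      omega
    -- characterization: canDo n q = true ↔ M ≤ n
    have hc : ∀ n, canDo n q = true ↔ M ≤ n := by
      intro n
      rw [canDo_iff hpair]
      constructor
      · rintro ⟨m, hm1, hle⟩
        rw [S_perm hperm] at hle
        by_cases hmle : m ≤ mx
        · obtain ⟨m', hmem', h1', hle', hcost'⟩ := cand_reduce hmxmax hm1 hmle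
          have hfilt : cost p m' ∈ ((candList p mx).filter (fun m => decide (m ≤ mx))).map (cost p) :=
            List.mem_map_of_mem (List.mem_filter.mpr ⟨hmem', by simp; omega⟩)
          have h4 := hMmin _ hfilt
          have hcm : cost p m = m + S m p := rfl
          omega
        · have : S m p = 0 := S_eq_zero (by intro x hx; have := hmxmax x hx; omega)
          omega
      · intro hn
        refine ⟨m0, by omega, ?_⟩
        rw [S_perm hperm]
        have : cost p m0 = m0 + S m0 p := rfl
        omega
    unfold bisect
    exact bisect_eq hc (mx - 0).toNat 0 mx (by omega) (by omega) hMle
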